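-- pv_equiv track=rewrite | github.com/Muneer320/Web-Scraper | Scrape all the/albumDownloader.py | generate_codes
-- ===== SOURCE A (Python) =====
-- import string
--
-- def generate_codes(n):
--     codes = []
--     i = 0
--     # Start with 3 characters by default
--     while len(codes) < n:
--         code = ""
--         num = i
--         # Generate base-26 code starting with 'aaa'
--         while True:
--             code = string.ascii_lowercase[num % 26] + code
--             num = num // 26 - 1
--             if num < 0:
--                 break
--         # Only accept codes with a length of 3 or more
--         if len(code) >= 3:
--             codes.append(code)
--         i += 1
--     return codes
-- ===== SOURCE B (Python) =====
-- import string
-- import itertools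
--
--
-- def generate_codes(n):
--     codes = []
--     length = 3
--     while len(codes) < n:
--         gen = ("".join(t) for t in itertools.product(string.ascii_lowercase, repeat=length))
--         codes.extend(itertools.islice(gen, n - len(codes)))
--         length += 1
--     return codes
-- ===== Notes on version B (the rewrite author's own statement) =====
-- stated objective: faster
-- what changed: Instead of incrementing an integer counter and decoding each value into bijective base-26 (rejecting the short codes), B directly enumerates fixed-length letter strings with itertools.product for each successive length starting at three, slicing off exactly the codes needed.
import Mathlib
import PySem

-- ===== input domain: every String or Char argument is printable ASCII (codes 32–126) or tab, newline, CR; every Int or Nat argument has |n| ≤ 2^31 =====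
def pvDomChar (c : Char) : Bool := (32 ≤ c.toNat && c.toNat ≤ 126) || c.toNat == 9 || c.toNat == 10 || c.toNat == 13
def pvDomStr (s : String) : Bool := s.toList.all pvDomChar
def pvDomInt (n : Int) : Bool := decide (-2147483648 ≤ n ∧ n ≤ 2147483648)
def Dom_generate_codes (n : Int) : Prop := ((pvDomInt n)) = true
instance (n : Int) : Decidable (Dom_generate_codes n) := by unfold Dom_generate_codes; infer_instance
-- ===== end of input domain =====

-- B enumerates fixed-length letter strings directly via the product construction instead of
-- decoding an incrementing integer counter into bijective base-26; same return value, no mutation.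

-- string.ascii_lowercase
def pvAbc : List Char := "abcdefghijklmnopqrstuvwxyz".toList

-- ===== PORT A =====
-- inner `while True` loop of A; `num` is nonnegative throughout in A, so it is tracked as a Nat:
-- Python's break test `num // 26 - 1 < 0` is exactly `num < 26` there, and letters are prepended.
def pvEncLoop (num : Nat) (code : List Char) : List Char :=
  if num < 26 then pvAbc.getD (num % 26) 'a' :: code
  else pvEncLoop (num / 26 - 1) (pvAbc.getD (num % 26) 'a' :: code)
termination_by num
decreasing_by
  have h1 : num / 26 < num := Nat.div_lt_self (by omega) (by omega)
  omega

-- outer `while len(codes) < n` loop of A, with fuel n.toNat + 703 (= 702 codes shorter than 3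
-- letters that are rejected, plus at most n.toNat accepted codes, plus the final test).
def pvGoA (n : Int) : Nat → Nat → List String → List String
  | 0, _, codes => codes
  | fuel+1, i, codes =>
    if (codes.length : Int) < n then
      pvGoA n fuel (i+1)
        (if 3 ≤ (String.ofList (pvEncLoop i [])).length
         then codes ++ [String.ofList (pvEncLoop i [])] else codes)
    else codes

def generate_codes (n : Int) : List String :=
  pvGoA n (n.toNat + 703) 0 []

-- ===== PORT B =====
-- itertools.product(string.ascii_lowercase, repeat=len) in lexicographic order
-- (rightmost position varies fastest), as a list of length-`len` character lists.
def pvProd : Nat → List (List Char)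
  | 0 => [[]]
  | k+1 => (pvProd k).flatMap (fun t => pvAbc.map (fun c => t ++ [c]))

-- B's `while len(codes) < n` loop; islice(gen, n - len(codes)) is ported as `take` of the block.
-- Fuel n.toNat suffices: every iteration appends at least one code.
def pvGoB (n : Int) : Nat → Nat → List String → List String
  | 0, _, codes => codes
  | fuel+1, len, codes =>
    if (codes.length : Int) < n then
      pvGoB n fuel (len+1)
        (codes ++ (((pvProd len).map (fun t => String.ofList t)).take (n - (codes.length : Int)).toNat))
    else codes

def generate_codes_alt (n : Int) : List String :=
  pvGoB n n.toNat 3 []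

-- ===== PRECONDITION & SPEC =====
def Spec_generate_codes (n : Int) (out : List String) : Prop := out = generate_codes_alt n
instance (n : Int) (out : List String) : Decidable (Spec_generate_codes n out) := by unfold Spec_generate_codes; infer_instance

-- ===== CLAIM (what is proved, stated in full; the proofs are below) =====
def Claim_equal_generate_codes : Prop := ∀ (n : Int), Dom_generate_codes n → Spec_generate_codes n (generate_codes n)

-- ===== LEMMAS AND PROOFS =====

-- pvS m = number of nonempty codes of length ≤ m = 26 + 26^2 + ... + 26^m
def pvS : Nat → Nat
  | 0 => 0
  | m+1 => 26 * (1 + pvS m)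

-- the m+1 base-26 digits of k (low digit last), as letters
def pvDig : Nat → Nat → List Char
  | 0, k => [pvAbc.getD (k % 26) 'a']
  | m+1, k => pvDig m (k / 26) ++ [pvAbc.getD (k % 26) 'a']

theorem pvS_succ (m : Nat) : pvS (m+1) = pvS m + 26^(m+1) := by
  induction m with
  | zero => decide
  | succ m ih => simp only [pvS] at *; rw [pow_succ]; omega

theorem pvDig_length (m k : Nat) : (pvDig m k).length = m + 1 := by
  induction m generalizing k with
  | zero => simp [pvDig]
  | succ m ih => simp [pvDig, ih]

-- key decode lemma: A's inner loop on pvS m + k (k < 26^(m+1)) produces the m+1 digits of k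
theorem pvEncLoop_eq (m : Nat) : ∀ k, k < 26^(m+1) → ∀ code,
    pvEncLoop (pvS m + k) code = pvDig m k ++ code := by
  induction m with
  | zero =>
    intro k hk code
    rw [pvEncLoop]
    simp only [pvS]
    rw [if_pos (by omega : 0 + k < 26)]
    simp [pvDig]
  | succ m ih =>
    intro k hk code
    rw [pvEncLoop]
    have hS : pvS (m+1) = 26 * (1 + pvS m) := rfl
    rw [if_neg (by omega : ¬ pvS (m+1) + k < 26)]
    have hmod : (pvS (m+1) + k) % 26 = k % 26 := by omega
    have hdiv : (pvS (m+1) + k) / 26 - 1 = pvS m + k / 26 := by omega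
    have hk' : k / 26 < 26^(m+1) := by
      have : (26:Nat)^(m+1+1) = 26^(m+1) * 26 := by rw [pow_succ]
      omega
    rw [hmod, hdiv, ih (k/26) hk']
    simp [pvDig]

-- range (a*b) as b-sized blocks
theorem pvRange_mul (a b : Nat) :
    List.range (a * b) = (List.range a).flatMap (fun q => (List.range b).map (fun r => b * q + r)) := by
  induction a with
  | zero => simp
  | succ a ih =>
    rw [Nat.succ_mul, List.range_add, ih, List.range_succ]
    simp [Nat.mul_comm]

-- B's product block is exactly the digit decodings of 0..26^(m+1)-1
theorem pvProd_eq (m : Nat) : pvProd (m+1) = (List.range (26^(m+1))).map (pvDig m) := by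
  induction m with
  | zero => decide
  | succ m ih =>
    show (pvProd (m+1)).flatMap _ = _
    rw [ih, List.flatMap_map]
    have h26 : (26:Nat)^(m+1+1) = 26^(m+1) * 26 := by rw [pow_succ]
    rw [h26, pvRange_mul, List.map_flatMap]
    apply List.flatMap_congr
    intro q hq
    rw [List.map_map]
    have habc : pvAbc = (List.range 26).map (fun r => pvAbc.getD (r % 26) 'a') := by decide
    conv_lhs => rw [habc]
    rw [List.map_map]
    apply List.map_congr_left
    intro r hr
    have hr26 : r < 26 := List.mem_range.mp hr
    simp only [Function.comp, pvDig]
    have h1 : (26 * q + r) / 26 = q := by omega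
    have h2 : (26 * q + r) % 26 = r % 26 := by omega
    rw [h1, h2]

-- every Nat lies in exactly one length band [pvS m, pvS (m+1))
theorem pvDecomp (i : Nat) : ∃ m k, i = pvS m + k ∧ k < 26^(m+1) := by
  induction i with
  | zero => exact ⟨0, 0, rfl, by decide⟩
  | succ i ih =>
    obtain ⟨m, k, hi, hk⟩ := ih
    by_cases h : k + 1 < 26^(m+1)
    · exact ⟨m, k+1, by omega, h⟩
    · refine ⟨m+1, 0, ?_, by positivity⟩
      rw [pvS_succ]; omega

theorem pvEncLen_small (j : Nat) (hj : j < 702) : (pvEncLoop j []).length < 3 := by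
  by_cases h : j < 26
  · have h0 := pvEncLoop_eq 0 j (by simpa using h) []
    simp only [pvS, Nat.zero_add, List.append_nil] at h0
    rw [h0, pvDig_length]
    omega
  · have h26 : j = pvS 1 + (j - 26) := by simp [pvS]; omega
    have hk : j - 26 < 26^2 := by omega
    have h1 := pvEncLoop_eq 1 (j - 26) (by simpa using hk) []
    rw [← h26] at h1
    simp only [List.append_nil] at h1
    rw [h1, pvDig_length]
    omega

theorem pvEncLen_big (i : Nat) (hi : 702 ≤ i) : 3 ≤ (pvEncLoop i []).length := by
  obtain ⟨m, k, hik, hk⟩ := pvDecomp i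
  have henc := pvEncLoop_eq m k hk []
  rw [← hik] at henc
  simp only [List.append_nil] at henc
  rw [henc, pvDig_length]
  by_contra hlt
  have hm : m < 2 := by omega
  interval_cases m
  · simp [pvS] at hik; omega
  · simp [pvS] at hik
    have : (26:Nat)^(1+1) = 676 := by norm_num
    omega

-- skip phase of A: the first 702 counter values are rejected
theorem pvGoA_skip (n : Int) (hn : 0 < n) :
    ∀ d j fuel, j + d = 702 → pvGoA n (fuel + d) j [] = pvGoA n fuel 702 [] := by
  intro d
  induction d with
  | zero =>
    intro j fuel hj
    rw [show j = 702 by omega]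
    rfl
  | succ d ih =>
    intro j fuel hj
    have hj702 : j < 702 := by omega
    have hlen := pvEncLen_small j hj702
    rw [show fuel + (d+1) = (fuel + d) + 1 by omega, pvGoA]
    rw [if_pos (by simpa using hn)]
    rw [if_neg (by simp only [String.length_ofList]; omega)]
    exact ih (j+1) fuel (by omega)

-- accept phase of A: from counter i ≥ 702, with r codes still to produce
theorem pvGoA_accept (n : Int) :
    ∀ (r fuel : Nat), r ≤ fuel → ∀ (i : Nat) (codes : List String), 702 ≤ i →
    (codes.length : Int) + (r : Int) = n →
    pvGoA n fuel i codes
      = codes ++ (List.range r).map (fun k => String.ofList (pvEncLoop (i + k) [])) := by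
  intro r
  induction r with
  | zero =>
    intro fuel _ i codes _ hlen
    cases fuel with
    | zero => simp [pvGoA]
    | succ f => rw [pvGoA, if_neg (by omega)]; simp
  | succ r ih =>
    intro fuel hfuel i codes hi hlen
    obtain ⟨f, rfl⟩ : ∃ f, fuel = f + 1 := ⟨fuel - 1, by omega⟩
    rw [pvGoA, if_pos (by push_cast at hlen ⊢; omega)]
    rw [if_pos (by simp only [String.length_ofList]; exact pvEncLen_big i hi)]
    rw [ih f (by omega) (i+1) _ (by omega)
          (by simp only [List.length_append, List.length_cons, List.length_nil]; push_cast at hlen ⊢; omega)]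
    rw [List.range_succ_eq_map, List.map_cons, List.map_map]
    simp only [Nat.add_zero, List.append_assoc, List.singleton_append]
    congr 2
    apply List.map_congr_left
    intro k _
    simp only [Function.comp]
    congr 2
    omega

-- B's loop from length m+1 produces the decodings of the next (n - len codes) counter values
theorem pvGoB_eq (n : Int) :
    ∀ (fuel m : Nat) (codes : List String), (n - (codes.length : Int)).toNat ≤ fuel →
    pvGoB n fuel (m+1) codes
      = codes ++ (List.range (n - (codes.length : Int)).toNat).map
          (fun k => String.ofList (pvEncLoop (pvS m + k) [])) := by
  intro fuel
  induction fuel with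
  | zero =>
    intro m codes hf
    rw [show (n - (codes.length : Int)).toNat = 0 by omega]
    simp [pvGoB]
  | succ f ih =>
    intro m codes hf
    set r : Nat := (n - (codes.length : Int)).toNat with hr
    by_cases hcond : (codes.length : Int) < n
    · rw [pvGoB, if_pos hcond]
      set B : Nat := 26^(m+1) with hB
      have hBpos : 1 ≤ B := Nat.one_le_pow _ _ (by norm_num)
      have htake : (((pvProd (m+1)).map (fun t => String.ofList t)).take r)
          = (List.range (min r B)).map (fun k => String.ofList (pvEncLoop (pvS m + k) [])) := by
        rw [pvProd_eq, List.map_map, ← List.map_take, List.take_range]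
        apply List.map_congr_left
        intro k hk
        have hkB : k < B := lt_of_lt_of_le (List.mem_range.mp hk) (min_le_right _ _)
        simp only [Function.comp]
        rw [pvEncLoop_eq m k hkB, List.append_nil]
      rw [htake]
      set codes' := codes ++ (List.range (min r B)).map (fun k => String.ofList (pvEncLoop (pvS m + k) []))
      have hlen' : codes'.length = codes.length + min r B := by simp [codes']
      have hr' : (n - (codes'.length : Int)).toNat = r - B := by
        rw [hlen']; push_cast; omega
      rw [ih (m+1) codes' (by omega)]
      rw [hr', pvS_succ, ← hB]
      have hsplit : List.range r = List.range (min r B) ++ (List.range (r - B)).map (fun j => min r B + j) := by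
        rw [← List.range_add]
        congr 1
        omega
      have htail : (List.range (r - B)).map (fun k => String.ofList (pvEncLoop (pvS m + B + k) []))
          = (List.range (r - B)).map ((fun k => String.ofList (pvEncLoop (pvS m + k) [])) ∘ (fun j => min r B + j)) := by
        apply List.map_congr_left
        intro j hj
        have hjr : j < r - B := List.mem_range.mp hj
        have hmin : min r B = B := by omega
        simp only [Function.comp, hmin, Nat.add_assoc]
      simp only [codes', List.append_assoc]
      rw [htail, ← List.map_map, ← List.map_append, ← hsplit]
    · rw [show r = 0 by omega]
      rw [pvGoB, if_neg hcond]
      simp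

-- ===== VERDICT (by name: the statement is the Claim_ definition above) =====
theorem generate_codes_spec : Claim_equal_generate_codes := by
  intro n _
  unfold Spec_generate_codes generate_codes generate_codes_alt
  by_cases hn : n ≤ 0
  · have h0 : n.toNat = 0 := by omega
    rw [h0]
    rw [show (0:Nat) + 703 = 702 + 1 by rfl, pvGoA, if_neg (by simpa using hn)]
    rfl
  · have hn' : 0 < n := by omega
    rw [show n.toNat + 703 = (n.toNat + 1) + 702 by omega]
    rw [pvGoA_skip n (by omega) 702 0 (n.toNat + 1) rfl]
    rw [pvGoA_accept n n.toNat (n.toNat + 1) (by omega) 702 [] (by omega)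
          (by simp only [List.length_nil]; push_cast; omega)]
    rw [pvGoB_eq n n.toNat 2 [] (by simp only [List.length_nil]; push_cast; omega)]
    norm_num [pvS]
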